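-- pv_equiv track=rewrite | github.com/gomanish/Python | basic/hillvally.py | hillvalley
-- ===== SOURCE A (Python) =====
-- def hillvalley(l):
-- 	b=0
-- 	for x in range(1,len(l)-1):
-- 		if ((l[x-1]<l[x]) != (l[x]<l[x+1])):
-- 			b=b+1
-- 	if 0<b<=1:
-- 		return True
-- 	else:
-- 		return False
-- ===== SOURCE B (Python) =====
-- def hillvalley(l):
--     # directions of consecutive pairs
--     d = [a < b for a, b in zip(l, l[1:])]
--     # a hill/valley needs both directions to occur
--     if True not in d or False not in d:
--         return False
--     # first position where the direction flips; after it the direction must never flip back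
--     i = d.index(not d[0])
--     return all(x == d[i] for x in d[i:])
-- ===== Notes on version B (the rewrite author's own statement) =====
-- stated objective: alternative
-- what changed: B abandons A's single counting loop (increment b on each flip, then test 0<b<=1): it builds the direction list, rejects unless both directions occur, locates the first flip with list.index, and verifies with all() that the direction never flips back after it.
import Mathlib
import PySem

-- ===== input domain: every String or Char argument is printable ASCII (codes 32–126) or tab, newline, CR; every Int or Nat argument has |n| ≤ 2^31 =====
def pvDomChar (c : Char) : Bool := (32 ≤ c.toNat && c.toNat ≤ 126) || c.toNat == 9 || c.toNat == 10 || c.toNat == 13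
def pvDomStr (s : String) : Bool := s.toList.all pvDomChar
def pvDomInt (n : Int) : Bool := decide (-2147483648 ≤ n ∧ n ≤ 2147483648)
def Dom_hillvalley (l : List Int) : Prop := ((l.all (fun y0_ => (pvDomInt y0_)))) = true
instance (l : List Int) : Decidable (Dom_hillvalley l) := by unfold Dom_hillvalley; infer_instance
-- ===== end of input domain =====

-- B replaces A's flip-counting loop by search-and-verify on the direction list (both
-- directions present, first flip found with index, suffix checked constant); same O(n) cost.

-- ===== PORT A =====
-- literal port of A: b counts x in range(1, len(l)-1) with (l[x-1]<l[x]) != (l[x]<l[x+1]);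
-- every index is in range there, so pyGetD is exact.
def hillvalley (l : List Int) : Bool :=
  let b : Int :=
    (PySem.List.pyRange 1 (PySem.List.len l - 1) 1).foldl
      (fun b x =>
        if (decide (PySem.List.pyGetD l (x - 1) 0 < PySem.List.pyGetD l x 0)
            != decide (PySem.List.pyGetD l x 0 < PySem.List.pyGetD l (x + 1) 0)) then b + 1 else b)
      0
  if 0 < b ∧ b ≤ 1 then true else false

-- ===== PORT B =====
-- literal port of Source B: d = [a<b for a,b in zip(l, l[1:])]; if True not in d or False not in d:
-- return False; i = d.index(not d[0]); return all(x == d[i] for x in d[i:]).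
-- d[0] (headD) and d[i] (getD) are reached only when d is nonempty resp. i = index? found, so exact.
def hillvalley_alt (l : List Int) : Bool :=
  let d : List Bool := (l.zip (l.drop 1)).map (fun p => decide (p.1 < p.2))
  if !(d.contains true) || !(d.contains false) then false
  else
    let i : Nat := (PySem.List.index? d (!(d.headD false))).getD 0
    (d.drop i).all (fun x => x == d.getD i false)

-- ===== PRECONDITION & SPEC =====
def Spec_hillvalley (l : List Int) (out : Bool) : Prop := out = hillvalley_alt l
instance (l : List Int) (out : Bool) : Decidable (Spec_hillvalley l out) := by unfold Spec_hillvalley; infer_instance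

-- ===== CLAIM (what is proved, stated in full; the proofs are below) =====
def Claim_equal_hillvalley : Prop := ∀ (l : List Int), Dom_hillvalley l → Spec_hillvalley l (hillvalley l)

-- ===== LEMMAS AND PROOFS =====

-- number of adjacent direction changes in a boolean list (proof-side characterisation)
def pvChanges : List Bool → Nat
  | a :: b :: t => (if a != b then 1 else 0) + pvChanges (b :: t)
  | _ => 0

-- A's counting loop is a countP over the range.
theorem pv_foldl_count (p : Int → Bool) (xs : List Int) (b : Int) :
    xs.foldl (fun b x => if p x then b + 1 else b) b = b + (xs.countP p : Int) := by
  induction xs generalizing b with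
  | nil => simp
  | cons y ys ih =>
      simp only [List.foldl_cons, List.countP_cons, ih]
      by_cases h : p y = true <;> simp [h] <;> omega

-- adjacent changes of a mapped range = count of x with f (x-1) ≠ f x
theorem pv_changes_range (f : Int → Bool) (n : Nat) (a : Int) :
    pvChanges ((PySem.List.pyRange a (a + n) 1).map f)
      = (PySem.List.pyRange (a + 1) (a + n) 1).countP (fun x => f (x - 1) != f x) := by
  induction n generalizing a with
  | zero =>
      rw [PySem.List.pyRange_one_eq_nil (by omega), PySem.List.pyRange_one_eq_nil (by omega)]
      simp [pvChanges]
  | succ m ih =>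
      rw [PySem.List.pyRange_one_cons (a := a) (by push_cast; omega)]
      cases m with
      | zero =>
          rw [PySem.List.pyRange_one_eq_nil (a := a + 1) (by push_cast; omega)]
          simp [pvChanges]
      | succ k =>
          have ha : a + ((k + 1 + 1 : Nat) : Int) = (a + 1) + ((k + 1 : Nat) : Int) := by
            push_cast; ring
          rw [ha, PySem.List.pyRange_one_cons (a := a + 1) (by push_cast; omega)]
          simp only [List.map_cons, List.countP_cons]
          have hh : pvChanges (f a :: f (a + 1) ::
                (PySem.List.pyRange (a + 1 + 1) (a + 1 + ((k + 1 : Nat) : Int)) 1).map f)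
              = (if f a != f (a + 1) then 1 else 0) + pvChanges (f (a + 1) ::
                (PySem.List.pyRange (a + 1 + 1) (a + 1 + ((k + 1 : Nat) : Int)) 1).map f) := rfl
          rw [hh]
          have hcons : f (a + 1) ::
                (PySem.List.pyRange (a + 1 + 1) (a + 1 + ((k + 1 : Nat) : Int)) 1).map f
              = (PySem.List.pyRange (a + 1) (a + 1 + ((k + 1 : Nat) : Int)) 1).map f := by
            rw [PySem.List.pyRange_one_cons (a := a + 1) (by push_cast; omega)]
            simp
          rw [hcons, ih (a + 1)]
          have h1 : a + 1 - 1 = a := by ring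
          rw [h1]
          by_cases hfa : (f a != f (a + 1)) = true <;> simp [hfa] <;> omega

-- no changes ⟺ everything equals the head
theorem pv_changes_zero (b : Bool) (t : List Bool) :
    (pvChanges (b :: t) = 0) ↔ ((b :: t).all (fun x => x == b) = true) := by
  induction t generalizing b with
  | nil => simp [pvChanges]
  | cons x t' ih =>
      by_cases hx : x = b
      · subst hx
        have hc : pvChanges (x :: x :: t') = pvChanges (x :: t') := by simp [pvChanges]
        rw [hc, ih x]
        simp
      · have hbx : (b != x) = true := by
          cases b <;> cases x <;> simp_all
        have hc : pvChanges (b :: x :: t') = 1 + pvChanges (x :: t') := by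
          simp [pvChanges, hbx]
        rw [hc]
        constructor
        · omega
        · intro h
          simp only [List.all_cons, Bool.and_eq_true, beq_iff_eq] at h
          exact absurd h.2.1 hx

-- core: "exactly one change" equals B's search-and-verify test, for any boolean list
theorem pv_main (d : List Bool) :
    ((pvChanges d == 1) : Bool)
      = (if !(d.contains true) || !(d.contains false) then false
         else (d.drop ((PySem.List.index? d (!(d.headD false))).getD 0)).all
            (fun x => x == d.getD ((PySem.List.index? d (!(d.headD false))).getD 0) false)) := by
  induction d with
  | nil => simp [pvChanges]
  | cons c t ih =>
      cases t with
      | nil => cases c <;> simp [pvChanges]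
      | cons b t' =>
          by_cases hb : b = c
          · subst hb
            have hc : pvChanges (b :: b :: t') = pvChanges (b :: t') := by simp [pvChanges]
            rw [hc, ih]
            have hcontains : ∀ v : Bool, (b :: b :: t').contains v = (b :: t').contains v := by
              intro v; simp only [List.contains_cons]; cases (v == b) <;> simp
            by_cases hg : (!( (b :: t').contains true) || !((b :: t').contains false)) = true
            · rw [if_pos hg, if_pos (by rw [hcontains, hcontains]; exact hg)]
            · rw [if_neg hg, if_neg (by rw [hcontains, hcontains]; exact hg)]
              -- both values occur, so !b ∈ b :: t', index? finds it in t'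
              have hcf : ((b :: t').contains true) = true ∧ ((b :: t').contains false) = true := by
                revert hg
                cases h1 : (b :: t').contains true <;> cases h2 : (b :: t').contains false <;> simp
              have hmem : (!b) ∈ (b :: t') := by
                cases b
                · simpa using hcf.1
                · simpa using hcf.2
              have hmem' : (!b) ∈ t' := by
                rcases List.mem_cons.mp hmem with h | h
                · exact absurd h (by cases b <;> decide)
                · exact h
              obtain ⟨j, hj⟩ : ∃ j, PySem.List.index? t' (!b) = some j := by
                have := (PySem.List.index?_isSome_iff (xs := t') (v := !b)).mpr hmem'
                exact Option.isSome_iff_exists.mp this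
              have hne : b ≠ !b := by cases b <;> decide
              have hidx1 : PySem.List.index? (b :: t') (!b) = some (j + 1) := by
                rw [PySem.List.index?_cons_of_ne t' hne, hj]; rfl
              have hidx2 : PySem.List.index? (b :: b :: t') (!b) = some (j + 2) := by
                rw [PySem.List.index?_cons_of_ne (b :: t') hne, hidx1]; rfl
              simp only [List.headD_cons, hidx1, hidx2, Option.getD_some]
              have hdrop : (b :: b :: t').drop (j + 2) = (b :: t').drop (j + 1) := rfl
              have hget : (b :: b :: t').getD (j + 2) false = (b :: t').getD (j + 1) false := rfl
              rw [hdrop, hget]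
          · -- b = !c : the first flip is at position 1
            have hbc : b = !c := by cases b <;> cases c <;> simp_all
            subst hbc
            have hc1 : pvChanges (c :: (!c) :: t') = 1 + pvChanges ((!c) :: t') := by
              have hcx : (c != !c) = true := by cases c <;> decide
              simp [pvChanges, hcx]
            rw [hc1]
            rw [if_neg (by cases c <;> simp)]
            have hne : c ≠ !c := by cases c <;> decide
            have hidx : PySem.List.index? (c :: (!c) :: t') (!c) = some 1 := by
              rw [PySem.List.index?_cons_of_ne ((!c) :: t') hne, PySem.List.index?_cons_self]; rfl
            simp only [List.headD_cons, hidx, Option.getD_some]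
            have hdrop : (c :: (!c) :: t').drop 1 = (!c) :: t' := rfl
            have hget : (c :: (!c) :: t').getD 1 false = !c := rfl
            rw [hdrop, hget]
            have hz := pv_changes_zero (!c) t'
            by_cases h0 : pvChanges ((!c) :: t') = 0
            · rw [hz.mp h0]; simp [h0]
            · have hall : (((!c) :: t').all (fun x => x == !c)) = false := by
                by_contra hx
                exact h0 (hz.mpr (by revert hx; cases (((!c) :: t').all (fun x => x == !c)) <;> simp))
              rw [hall]
              have h1 : (1 + pvChanges ((!c) :: t') == 1) = false := by
                simp; omega
              exact h1

-- B's direction list is the range-indexed direction function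
theorem pv_d_eq (l : List Int) :
    (l.zip (l.drop 1)).map (fun p => decide (p.1 < p.2))
      = (PySem.List.pyRange 0 ((l.length - 1 : Nat) : Int) 1).map
          (fun i => decide (PySem.List.pyGetD l i 0 < PySem.List.pyGetD l (i + 1) 0)) := by
  apply List.ext_getElem
  · simp [PySem.List.length_pyRange_one]
  · intro k h1 h2
    have hk : k < l.length - 1 := by
      simp at h1; omega
    simp only [List.getElem_map, List.getElem_zip, PySem.List.getElem_pyRange_one,
      List.getElem_drop]
    have e1 : PySem.List.pyGetD l ((0 : Int) + (k : Nat)) 0 = l[k]'(by omega) := by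
      rw [show (0 : Int) + (k : Nat) = ((k : Nat) : Int) by ring]
      rw [PySem.List.pyGetD_natCast]
      simp [List.getD, List.getElem?_eq_getElem (by omega : k < l.length)]
    have e2 : PySem.List.pyGetD l ((0 : Int) + (k : Nat) + 1) 0 = l[k + 1]'(by omega) := by
      rw [show (0 : Int) + (k : Nat) + 1 = ((k + 1 : Nat) : Int) by push_cast; ring]
      rw [PySem.List.pyGetD_natCast]
      simp [List.getD, List.getElem?_eq_getElem (by omega : k + 1 < l.length)]
    simp only [e1, e2, show 1 + k = k + 1 from Nat.add_comm 1 k]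

-- ===== VERDICT (by name: the statement is the Claim_ definition above) =====
theorem hillvalley_spec : Claim_equal_hillvalley := by
  intro l _
  unfold Spec_hillvalley hillvalley hillvalley_alt
  set f : Int → Bool := fun i => decide (PySem.List.pyGetD l i 0 < PySem.List.pyGetD l (i + 1) 0) with hf
  simp only []
  rw [pv_foldl_count]
  by_cases hl : l = []
  · subst hl; decide
  · have hlen : 1 ≤ l.length := by
      cases l with
      | nil => exact absurd rfl hl
      | cons _ _ => simp
    have hm : PySem.List.len l - 1 = (0 : Int) + ((l.length - 1 : Nat) : Int) := by
      simp [PySem.List.len_eq]; omega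
    rw [pv_d_eq l]
    have hd0 : (PySem.List.pyRange 0 ((l.length - 1 : Nat) : Int) 1)
        = (PySem.List.pyRange 0 ((0 : Int) + ((l.length - 1 : Nat) : Int)) 1) := by
      rw [zero_add]
    rw [hd0, hm, ← pv_main ((PySem.List.pyRange 0 ((0:Int) + ((l.length - 1 : Nat) : Int)) 1).map f),
      pv_changes_range f (l.length - 1) 0]
    have hcongr : (PySem.List.pyRange 1 (0 + ((l.length - 1 : Nat) : Int)) 1).countP
          (fun x => decide (PySem.List.pyGetD l (x - 1) 0 < PySem.List.pyGetD l x 0)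
            != decide (PySem.List.pyGetD l x 0 < PySem.List.pyGetD l (x + 1) 0))
        = (PySem.List.pyRange (0 + 1) (0 + ((l.length - 1 : Nat) : Int)) 1).countP
          (fun x => f (x - 1) != f x) := by
      apply List.countP_congr
      intro x _
      simp [hf, sub_add_cancel]
    rw [← hcongr]
    set c := (PySem.List.pyRange 1 (0 + ((l.length - 1 : Nat) : Int)) 1).countP
        (fun x => decide (PySem.List.pyGetD l (x - 1) 0 < PySem.List.pyGetD l x 0)
          != decide (PySem.List.pyGetD l x 0 < PySem.List.pyGetD l (x + 1) 0))
    have hc : (0 < (0 : Int) + (c : Int) ∧ (0 : Int) + (c : Int) ≤ 1) ↔ c = 1 := by omega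
    simp only [hc]
    by_cases h : c = 1 <;> simp [h]
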